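-- pv_equiv track=rewrite | github.com/Raihancoding/SimulatorFistat | Home.py | find_macrostates
-- ===== SOURCE A (Python) =====
-- def find_macrostates(N, E_levels, E_total):
--     """Mencari semua Macrostate (n1, n2, ...) yang memenuhi N dan E_total (Menggunakan Backtracking)."""
--     results = []
--     L = len(E_levels)
--     def backtrack(i, remN, remE, current):
--         if i == L:
--             if remN == 0 and remE == 0:
--                 results.append(current.copy())
--             return
--
--         max_n = remN
--
--         for n in range(max_n + 1):
--             neededE = n * E_levels[i]
--             if neededE > remE:
--                 break
--
--             current.append(n)
--             backtrack(i + 1, remN - n, remE - neededE, current)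
--             current.pop()
--
--     backtrack(0, N, E_total, [])
--     return results
-- ===== SOURCE B (Python) =====
-- def find_macrostates(N, E_levels, E_total):
--     """Mencari semua Macrostate yang memenuhi N dan E_total (ekspansi frontier level-per-level, iteratif)."""
--     states = [([], N, E_total)]
--     for E in E_levels:
--         new_states = []
--         for pref, remN, remE in states:
--             n = 0
--             while n <= remN and n * E <= remE:
--                 new_states.append((pref + [n], remN - n, remE - n * E))
--                 n += 1
--         states = new_states
--     return [pref for pref, remN, remE in states if remN == 0 and remE == 0]
-- ===== Notes on version B (the rewrite author's own statement) =====
-- stated objective: alternative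
-- what changed: Replaces the recursive backtracker (shared mutable current list, append/recurse/pop into a closed-over results list) with a non-recursive breadth-first frontier expansion: a fold over the levels carrying a list of (prefix, remaining N, remaining E) states, extended per level by a while loop, with a final filter keeping states that used up N and E exactly.
import Mathlib
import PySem

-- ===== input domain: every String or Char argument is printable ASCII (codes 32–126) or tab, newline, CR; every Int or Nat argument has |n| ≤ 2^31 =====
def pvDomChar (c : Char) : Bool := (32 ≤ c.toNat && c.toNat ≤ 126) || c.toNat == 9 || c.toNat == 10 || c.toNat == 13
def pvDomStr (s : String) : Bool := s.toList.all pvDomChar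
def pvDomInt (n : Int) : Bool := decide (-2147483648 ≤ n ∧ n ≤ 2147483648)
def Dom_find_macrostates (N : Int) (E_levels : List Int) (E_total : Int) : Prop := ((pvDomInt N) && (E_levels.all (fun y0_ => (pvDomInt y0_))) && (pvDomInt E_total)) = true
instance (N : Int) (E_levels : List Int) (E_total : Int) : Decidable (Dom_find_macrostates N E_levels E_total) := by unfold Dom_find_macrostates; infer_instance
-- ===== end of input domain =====

-- B replaces A's recursive backtracking (shared mutable current/results) by an iterative
-- level-by-level frontier expansion (no recursion over levels); objective: alternative.

-- ===== PORT A =====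
-- 'backtrack' with the shared mutable 'current'/'results' is ported by threading both
-- explicitly; the 'for n in range(max_n+1)' loop with its 'break' is the fuel recursion pvLoopA.
mutual
def pvBtA : List Int → Int → Int → List Int → List (List Int) → List (List Int)
  | [], remN, remE, current, results =>
      if remN = 0 ∧ remE = 0 then results ++ [current] else results
  | e :: rest, remN, remE, current, results =>
      pvLoopA e rest remE current ((remN + 1).toNat) 0 remN results
  termination_by l _ _ _ _ => (l.length, 1, 0)

def pvLoopA (e : Int) (rest : List Int) (remE : Int) (current : List Int) :
    Nat → Int → Int → List (List Int) → List (List Int)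
  | 0, _, _, results => results
  | Nat.succ k, n, remN, results =>
      let neededE := n * e
      if neededE > remE then results
      else pvLoopA e rest remE current k (n + 1) remN
             (pvBtA rest (remN - n) (remE - neededE) (current ++ [n]) results)
  termination_by k _ _ _ => (rest.length + 1, 0, k)
end

def find_macrostates (N : Int) (E_levels : List Int) (E_total : Int) : List (List Int) :=
  pvBtA E_levels N E_total [] []

-- ===== PORT B =====
-- iterative frontier expansion: a fold over the levels carrying the list of
-- (prefix, remN, remE) states; the inner 'while' is the fuel recursion pvWhileB.
def pvWhileB (e : Int) (pref : List Int) (remN remE : Int) :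
    Nat → Int → List (List Int × Int × Int)
  | 0, _ => []
  | Nat.succ k, n =>
      if n ≤ remN ∧ n * e ≤ remE then
        (pref ++ [n], remN - n, remE - n * e) :: pvWhileB e pref remN remE k (n + 1)
      else []

def pvStepB (e : Int) (states : List (List Int × Int × Int)) : List (List Int × Int × Int) :=
  states.flatMap (fun s => pvWhileB e s.1 s.2.1 s.2.2 ((s.2.1 + 1).toNat) 0)

def find_macrostates_alt (N : Int) (E_levels : List Int) (E_total : Int) : List (List Int) :=
  (E_levels.foldl (fun states e => pvStepB e states) [([], N, E_total)]).filterMap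
    (fun s => if s.2.1 = 0 ∧ s.2.2 = 0 then some s.1 else none)

-- ===== PRECONDITION & SPEC =====
def Spec_find_macrostates (N : Int) (E_levels : List Int) (E_total : Int) (out : List (List Int)) : Prop := out = find_macrostates_alt N E_levels E_total
instance (N : Int) (E_levels : List Int) (E_total : Int) (out : List (List Int)) : Decidable (Spec_find_macrostates N E_levels E_total out) := by unfold Spec_find_macrostates; infer_instance

-- ===== CLAIM (what is proved, stated in full; the proofs are below) =====
def Claim_equal_find_macrostates : Prop := ∀ (N : Int) (E_levels : List Int) (E_total : Int), Dom_find_macrostates N E_levels E_total → Spec_find_macrostates N E_levels E_total (find_macrostates N E_levels E_total)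

-- ===== LEMMAS AND PROOFS =====

-- Reference pure recursion pvS/pvT: the common functional characterisation both ports are
-- proved equal to (used only by the proofs).
mutual
def pvS : List Int → Int → Int → List (List Int)
  | [], remN, remE => if remN = 0 ∧ remE = 0 then [[]] else []
  | e :: rest, remN, remE => pvT e rest remE ((remN + 1).toNat) 0 remN
  termination_by l _ _ => (l.length, 1, 0)

def pvT (e : Int) (rest : List Int) (remE : Int) :
    Nat → Int → Int → List (List Int)
  | 0, _, _ => []
  | Nat.succ k, n, remN =>
      if n * e > remE then []
      else (pvS rest (remN - n) (remE - n * e)).map (fun t => n :: t)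
             ++ pvT e rest remE k (n + 1) remN
  termination_by k _ _ => (rest.length + 1, 0, k)
end

lemma pvLoop_eq (e : Int) (rest : List Int)
    (ih : ∀ remN remE current results,
      pvBtA rest remN remE current results
        = results ++ (pvS rest remN remE).map (fun t => current ++ t)) :
    ∀ (fuel : Nat) (n remN remE : Int) (current : List Int) (results : List (List Int)),
      pvLoopA e rest remE current fuel n remN results
        = results ++ (pvT e rest remE fuel n remN).map (fun t => current ++ t) := by
  intro fuel
  induction fuel with
  | zero => intro n remN remE current results; simp [pvLoopA, pvT]
  | succ k ihk =>
      intro n remN remE current results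
      simp only [pvLoopA, pvT]
      by_cases h : n * e > remE
      · simp [h]
      · simp only [h, if_false]
        rw [ihk, ih]
        simp [List.map_map, Function.comp]

lemma pvBt_eq : ∀ (l : List Int) (remN remE : Int) (current : List Int) (results : List (List Int)),
    pvBtA l remN remE current results
      = results ++ (pvS l remN remE).map (fun t => current ++ t) := by
  intro l
  induction l with
  | nil =>
      intro remN remE current results
      by_cases h : remN = 0 ∧ remE = 0 <;> simp [pvBtA, pvS, h]
  | cons e rest ih =>
      intro remN remE current results
      simp only [pvBtA, pvS]
      exact pvLoop_eq e rest ih _ _ _ _ _ _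

lemma pvWhile_flatMap (e : Int) (rest : List Int) (pref : List Int) (rn re : Int) :
    ∀ (k : Nat) (n : Int), (n + k = rn + 1) →
      (pvWhileB e pref rn re k n).flatMap
          (fun s => (pvS rest s.2.1 s.2.2).map (fun t => s.1 ++ t))
        = (pvT e rest re k n rn).map (fun t => pref ++ t) := by
  intro k
  induction k with
  | zero => intro n _; simp [pvWhileB, pvT]
  | succ m ihm =>
      intro n h
      have hle : n ≤ rn := by push_cast at h; omega
      by_cases hc : n * e ≤ re
      · have hcond : n ≤ rn ∧ n * e ≤ re := ⟨hle, hc⟩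
        have hnot : ¬ (n * e > re) := not_lt.mpr hc
        simp only [pvWhileB, pvT, if_pos hcond, if_neg hnot]
        rw [List.flatMap_cons, ihm (n + 1) (by push_cast at h ⊢; omega)]
        simp [List.map_map, Function.comp]
      · have hcond : ¬ (n ≤ rn ∧ n * e ≤ re) := by tauto
        have hgt : n * e > re := lt_of_not_ge hc
        simp [pvWhileB, pvT, hcond, hgt]

lemma pvStep_state (e : Int) (rest : List Int) (p : List Int) (rn re : Int) :
    (pvWhileB e p rn re ((rn + 1).toNat) 0).flatMap
        (fun s => (pvS rest s.2.1 s.2.2).map (fun t => s.1 ++ t))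
      = (pvS (e :: rest) rn re).map (fun t => p ++ t) := by
  rw [show pvS (e :: rest) rn re = pvT e rest re ((rn + 1).toNat) 0 rn by simp [pvS]]
  by_cases h : 0 ≤ rn + 1
  · exact pvWhile_flatMap e rest p rn re _ 0 (by simp [Int.toNat_of_nonneg h])
  · have h0 : (rn + 1).toNat = 0 := Int.toNat_of_nonpos (le_of_not_ge h)
    simp [h0, pvWhileB, pvT]

lemma pvFold_eq : ∀ (l : List Int) (states : List (List Int × Int × Int)),
    (l.foldl (fun st e => pvStepB e st) states).filterMap
        (fun s => if s.2.1 = 0 ∧ s.2.2 = 0 then some s.1 else none)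
      = states.flatMap (fun s => (pvS l s.2.1 s.2.2).map (fun t => s.1 ++ t)) := by
  intro l
  induction l with
  | nil =>
      intro states
      induction states with
      | nil => simp
      | cons s ss ihs =>
          simp only [List.foldl_nil] at ihs ⊢
          rw [List.filterMap_cons, List.flatMap_cons, ← ihs]
          by_cases h : s.2.1 = 0 ∧ s.2.2 = 0 <;> simp [pvS, h]
  | cons e rest ihl =>
      intro states
      simp only [List.foldl_cons]
      rw [ihl, show pvStepB e states
            = states.flatMap (fun s => pvWhileB e s.1 s.2.1 s.2.2 ((s.2.1 + 1).toNat) 0) from rfl,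
          List.flatMap_assoc]
      congr 1
      funext s
      exact pvStep_state e rest s.1 s.2.1 s.2.2

-- ===== VERDICT (by name: the statement is the Claim_ definition above) =====
theorem find_macrostates_spec : Claim_equal_find_macrostates := by
  intro N E_levels E_total _
  unfold Spec_find_macrostates find_macrostates find_macrostates_alt
  rw [pvBt_eq, pvFold_eq]
  simp
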